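-- pv_equiv track=rewrite | github.com/Icespedes56/L21 | main.py | modificar_linea_para_interes
-- ===== SOURCE A (Python) =====
-- def modificar_linea_para_interes(linea, valor_interes):
--     """Modifica la línea del LOG para reemplazar el valor de interés"""
--     if len(linea) >= 88:
--         linea_lista = list(linea)
--         nuevo_valor_str = str(valor_interes)
--         longitud_total = 15
--
--         if len(nuevo_valor_str) <= longitud_total:
--             nuevo_segmento = nuevo_valor_str.zfill(longitud_total)
--         else:
--             nuevo_segmento = nuevo_valor_str[-longitud_total:]
--
--         for i, caracter in enumerate(nuevo_segmento):
--             if 73 + i < len(linea_lista):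
--                 linea_lista[73 + i] = caracter
--
--         return ''.join(linea_lista)
--
--     return linea
-- ===== SOURCE B (Python) =====
-- def modificar_linea_para_interes(linea, valor_interes):
--     """Modifica la línea del LOG para reemplazar el valor de interés"""
--     if len(linea) < 88:
--         return linea
--     s = str(valor_interes)
--     seg = s.zfill(15) if len(s) <= 15 else s[-15:]
--     return linea[:73] + seg + linea[88:]
-- ===== Notes on version B (the rewrite author's own statement) =====
-- stated objective: simpler
-- what changed: Replaces the list/mutate-in-a-loop/join construction with pure string slicing: since the segment is always exactly 15 characters and the line has length >= 88, the result is linea[:73] + seg + linea[88:].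
import Mathlib
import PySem

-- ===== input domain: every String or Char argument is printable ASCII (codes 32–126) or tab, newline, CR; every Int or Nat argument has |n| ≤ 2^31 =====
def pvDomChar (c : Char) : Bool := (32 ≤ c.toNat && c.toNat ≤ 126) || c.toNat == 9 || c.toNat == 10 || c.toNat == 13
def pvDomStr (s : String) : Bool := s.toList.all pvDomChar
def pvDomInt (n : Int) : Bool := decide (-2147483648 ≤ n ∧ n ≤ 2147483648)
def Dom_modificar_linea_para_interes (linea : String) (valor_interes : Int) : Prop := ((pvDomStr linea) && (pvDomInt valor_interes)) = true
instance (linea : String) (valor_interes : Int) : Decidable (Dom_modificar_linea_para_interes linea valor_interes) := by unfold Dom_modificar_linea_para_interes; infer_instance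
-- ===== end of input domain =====

-- B replaces A's list/mutate-in-a-loop/join construction with pure string slicing (simpler).

-- shared library helper: Python's str.zfill on a list of characters (sign-aware zero padding)
def pyZfill (cs : List Char) (w : Nat) : List Char :=
  if w ≤ cs.length then cs
  else
    match cs with
    | [] => List.replicate w '0'
    | c :: rest =>
      if c = '-' ∨ c = '+' then c :: (List.replicate (w - 1 - rest.length) '0' ++ rest)
      else List.replicate (w - cs.length) '0' ++ (c :: rest)

-- ===== PORT A =====
def modificar_linea_para_interes (linea : String) (valor_interes : Int) : String :=
  if 88 ≤ linea.toList.length then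
    let linea_lista := linea.toList
    let nuevo_valor_str := PySem.Int.toChars valor_interes
    let longitud_total : Nat := 15
    let nuevo_segmento :=
      if nuevo_valor_str.length ≤ longitud_total then pyZfill nuevo_valor_str longitud_total
      else PySem.List.slice nuevo_valor_str (some (-(15:Int))) none
    let final := (PySem.List.enumerate nuevo_segmento 0).foldl
      (fun lst p =>
        if 73 + p.1 < (lst.length : Int) then PySem.List.pySetD lst (73 + p.1) p.2 else lst)
      linea_lista
    String.ofList final
  else linea

-- ===== PORT B =====
def modificar_linea_para_interes_alt (linea : String) (valor_interes : Int) : String :=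
  let cs := linea.toList
  if cs.length < 88 then linea
  else
    let s := PySem.Int.toChars valor_interes
    let seg := if s.length ≤ 15 then pyZfill s 15 else PySem.List.slice s (some (-(15:Int))) none
    String.ofList (PySem.List.slice cs none (some (73:Int)) ++ seg ++ PySem.List.slice cs (some (88:Int)) none)

-- ===== PRECONDITION & SPEC =====
def Spec_modificar_linea_para_interes (linea : String) (valor_interes : Int) (out : String) : Prop := out = modificar_linea_para_interes_alt linea valor_interes
instance (linea : String) (valor_interes : Int) (out : String) : Decidable (Spec_modificar_linea_para_interes linea valor_interes out) := by unfold Spec_modificar_linea_para_interes; infer_instance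

-- ===== CLAIM (what is proved, stated in full; the proofs are below) =====
def Claim_equal_modificar_linea_para_interes : Prop := ∀ (linea : String) (valor_interes : Int), Dom_modificar_linea_para_interes linea valor_interes → Spec_modificar_linea_para_interes linea valor_interes (modificar_linea_para_interes linea valor_interes)

-- ===== LEMMAS AND PROOFS =====

theorem pyZfill_length (cs : List Char) (w : Nat) : (pyZfill cs w).length = max w cs.length := by
  cases cs with
  | nil =>
    simp only [pyZfill]
    split
    · rename_i h; simp at h; subst h; simp
    · rw [List.length_replicate]; simp
  | cons c rest =>
    simp only [pyZfill]
    split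
    · simp only [List.length_cons] at *; omega
    · split
      · simp only [List.length_cons, List.length_append, List.length_replicate] at *; omega
      · simp only [List.length_cons, List.length_append, List.length_replicate] at *; omega

theorem take_set_succ : ∀ (cs : List Char) (n : Nat) (c : Char), n < cs.length →
    (cs.set n c).take (n + 1) = cs.take n ++ [c] := by
  intro cs
  induction cs with
  | nil => intro n c h; simp at h
  | cons a as ih =>
    intro n c h
    cases n with
    | zero => simp
    | succ m =>
      simp only [List.set_cons_succ, List.take_succ_cons, List.cons_append]
      rw [ih m c (by simp at h; omega)]

theorem drop_set_of_lt : ∀ (cs : List Char) (n m : Nat) (c : Char), n < m →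
    (cs.set n c).drop m = cs.drop m := by
  intro cs
  induction cs with
  | nil => intro n m c h; simp
  | cons a as ih =>
    intro n m c h
    cases m with
    | zero => omega
    | succ m' =>
      cases n with
      | zero => simp
      | succ n' =>
        simp only [List.set_cons_succ, List.drop_succ_cons]
        exact ih n' m' c (by omega)

theorem loop_eq (seg : List Char) : ∀ (k : Nat) (cs : List Char), 73 + k + seg.length ≤ cs.length →
    (PySem.List.enumerate seg (k : Int)).foldl
      (fun lst p =>
        if 73 + p.1 < (lst.length : Int) then PySem.List.pySetD lst (73 + p.1) p.2 else lst)
      cs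
    = cs.take (73 + k) ++ seg ++ cs.drop (73 + k + seg.length) := by
  induction seg with
  | nil =>
    intro k cs h
    simp [PySem.List.enumerate_nil]
  | cons c rest ih =>
    intro k cs h
    simp only [List.length_cons] at h
    rw [PySem.List.enumerate_cons, List.foldl_cons]
    have hlt : 73 + (k : Int) < (cs.length : Int) := by
      have : 73 + k < cs.length := by omega
      exact_mod_cast this
    rw [if_pos hlt]
    have hcast : (73 + (k : Int)) = ((73 + k : Nat) : Int) := by push_cast; ring
    rw [hcast, PySem.List.pySetD_natCast]
    have hk1 : ((k : Int) + 1) = (((k + 1 : Nat)) : Int) := by push_cast; ring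
    rw [hk1, ih (k + 1) (cs.set (73 + k) c) (by simp [List.length_set]; omega)]
    have hn : 73 + k < cs.length := by omega
    rw [show 73 + (k + 1) = (73 + k) + 1 by ring]
    rw [take_set_succ cs (73 + k) c hn,
        drop_set_of_lt cs (73 + k) ((73 + k) + 1 + rest.length) c (by omega)]
    simp only [List.length_cons]
    rw [show 73 + k + (rest.length + 1) = (73 + k) + 1 + rest.length from by omega]
    simp [List.append_assoc]

theorem seg_length (v : Int) :
    (if (PySem.Int.toChars v).length ≤ 15 then pyZfill (PySem.Int.toChars v) 15
     else PySem.List.slice (PySem.Int.toChars v) (some (-(15:Int))) none).length = 15 := by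
  split
  · rw [pyZfill_length]; omega
  · rename_i h
    rw [PySem.List.slice_from_neg_ofNat _ 15 (by omega)]
    simp; omega

-- ===== VERDICT (by name: the statement is the Claim_ definition above) =====
theorem modificar_linea_para_interes_spec : Claim_equal_modificar_linea_para_interes := by
  intro linea v _
  unfold Spec_modificar_linea_para_interes modificar_linea_para_interes modificar_linea_para_interes_alt
  by_cases h : 88 ≤ linea.toList.length
  · rw [if_pos h, if_neg (by omega)]
    simp only
    congr 1
    have hseg := seg_length v
    have hl := loop_eq _ 0 linea.toList (by rw [hseg]; omega)
    simp only [Nat.cast_zero, Nat.add_zero] at hl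
    rw [hl, hseg]
    norm_num
    simp [pysem]
  · rw [if_neg h, if_pos (by omega)]
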